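-- pv_equiv track=rewrite | github.com/Flu-iid/py-algo | algo-competitions/PPC1/لیگ محلات.py | read_score
-- ===== SOURCE A (Python) =====
-- def plays(n: int):
--     guide = list(range(n))
--     result = []
--     for first_i, e in enumerate(guide):
--         for second_i in range(first_i + 1, n):
--             result.append((first_i, second_i))
--     return result
--
-- def read_score(n, scores):
--     maps = dict()
--     to_check = plays(n)
--     for pair in to_check:
--         team1, team2 = pair[0], pair[1]
--         goal1 = scores[team1 * n + team2]
--         goal2 = scores[team1 + team2 * n]
--         # first score, second goal diff
--         maps.setdefault(team1, [0, 0])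
--         maps.setdefault(team2, [0, 0])
--         if goal1 == goal2:
--             maps[team1][0] += 1
--             maps[team2][0] += 1
--         elif goal1 > goal2:
--             maps[team1][0] += 3
--             maps[team1][1] += goal1 - goal2
--
--             maps[team2][1] += goal2 - goal1
--         else:
--             maps[team2][0] += 3
--             maps[team2][1] += goal2 - goal1
--
--             maps[team1][1] += goal1 - goal2
--
--     return maps
-- ===== SOURCE B (Python) =====
-- def read_score(n, scores):
--     result = {}
--     if n >= 2:
--         for i in range(n):
--             pts = 0
--             gd = 0
--             for j in range(n):
--                 if j == i:
--                     continue
--                 own = scores[i * n + j]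
--                 opp = scores[j * n + i]
--                 if own > opp:
--                     pts += 3
--                 elif own == opp:
--                     pts += 1
--                 gd += own - opp
--             result[i] = [pts, gd]
--     return result
-- ===== Notes on version B (the rewrite author's own statement) =====
-- stated objective: simpler
-- what changed: B drops A's precomputed pair list and symmetric dict mutation entirely: it loops over each team i in order and accumulates that team's points and goal difference in one pass over its opponents j != i, reading scores[i*n+j] and scores[j*n+i] directly.
import Mathlib
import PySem

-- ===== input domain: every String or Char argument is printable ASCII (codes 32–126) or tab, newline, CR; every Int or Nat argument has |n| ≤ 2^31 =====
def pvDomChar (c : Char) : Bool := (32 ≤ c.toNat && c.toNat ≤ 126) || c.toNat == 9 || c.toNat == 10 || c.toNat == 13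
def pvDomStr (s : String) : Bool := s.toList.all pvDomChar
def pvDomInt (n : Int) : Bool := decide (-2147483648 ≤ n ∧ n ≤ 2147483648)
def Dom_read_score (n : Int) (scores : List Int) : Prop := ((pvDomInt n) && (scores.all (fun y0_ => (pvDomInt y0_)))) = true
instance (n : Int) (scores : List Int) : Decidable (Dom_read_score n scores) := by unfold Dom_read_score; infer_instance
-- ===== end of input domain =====

-- B replaces A's match-pair list and symmetric two-sided dict updates by a direct
-- per-team accumulation of points and goal difference; objective: simpler, same value.

-- ===== PORT A =====
-- A builds the list of all matches (i, j) with i < j.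
def plays (n : Int) : List (Int × Int) :=
  (PySem.List.enumerate (PySem.List.pyRange 0 n 1)).foldl
    (fun result fe =>
      (PySem.List.pyRange (fe.1 + 1) n 1).foldl
        (fun result second_i => result ++ [(fe.1, second_i)]) result)
    []

-- The if/elif/else of A's loop body (after the two setdefaults); `v.set k (v.getD k 0 + c)`
-- is Python's `v[k] += c`, exact on the 2-element value lists this dict holds.
-- `(PySem.List.pyGet? scores idx).getD 0`: the IndexError inputs are excluded by Pre_.
def rsBranch (n : Int) (scores : List Int) (team1 team2 : Int)
    (maps : PySem.Dict Int (List Int)) : PySem.Dict Int (List Int) :=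
  let goal1 := (PySem.List.pyGet? scores (team1 * n + team2)).getD 0
  let goal2 := (PySem.List.pyGet? scores (team1 + team2 * n)).getD 0
  if goal1 = goal2 then
    let maps := maps.modify team1 [] (fun v => v.set 0 (v.getD 0 0 + 1))
    maps.modify team2 [] (fun v => v.set 0 (v.getD 0 0 + 1))
  else if goal1 > goal2 then
    let maps := maps.modify team1 [] (fun v => v.set 0 (v.getD 0 0 + 3))
    let maps := maps.modify team1 [] (fun v => v.set 1 (v.getD 1 0 + (goal1 - goal2)))
    maps.modify team2 [] (fun v => v.set 1 (v.getD 1 0 + (goal2 - goal1)))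
  else
    let maps := maps.modify team2 [] (fun v => v.set 0 (v.getD 0 0 + 3))
    let maps := maps.modify team2 [] (fun v => v.set 1 (v.getD 1 0 + (goal2 - goal1)))
    maps.modify team1 [] (fun v => v.set 1 (v.getD 1 0 + (goal1 - goal2)))

def rsStep (n : Int) (scores : List Int) (maps : PySem.Dict Int (List Int))
    (pair : Int × Int) : PySem.Dict Int (List Int) :=
  rsBranch n scores pair.1 pair.2
    ((maps.setdefault pair.1 [0, 0]).setdefault pair.2 [0, 0])

def read_score (n : Int) (scores : List Int) : List (Int × List Int) :=
  ((plays n).foldl (rsStep n scores) PySem.Dict.empty).items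

-- ===== PORT B =====
-- per-team inner loop of Source B: pts/gd accumulated over all opponents j ≠ i.
def altInner (n : Int) (scores : List Int) (i : Int) : Int × Int :=
  (PySem.List.pyRange 0 n 1).foldl
    (fun pg j =>
      if j == i then pg
      else (pg.1 + (if (PySem.List.pyGet? scores (i * n + j)).getD 0 >
                       (PySem.List.pyGet? scores (j * n + i)).getD 0 then 3
                    else if (PySem.List.pyGet? scores (i * n + j)).getD 0 =
                            (PySem.List.pyGet? scores (j * n + i)).getD 0 then 1 else 0),
            pg.2 + ((PySem.List.pyGet? scores (i * n + j)).getD 0 -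
                    (PySem.List.pyGet? scores (j * n + i)).getD 0)))
    (0, 0)

def read_score_alt (n : Int) (scores : List Int) : List (Int × List Int) :=
  if n ≥ 2 then
    ((PySem.List.pyRange 0 n 1).foldl
      (fun result i => result.insert i [(altInner n scores i).1, (altInner n scores i).2])
      PySem.Dict.empty).items
  else []

-- ===== PRECONDITION & SPEC =====
-- Pre_ excludes exactly the inputs where A raises IndexError: for n ≥ 2 it reads
-- scores[i*n+j] for all 0 ≤ i < j < n (largest index n*n - 2); for n ≤ 1 it reads nothing.
def Pre_read_score (n : Int) (scores : List Int) : Prop :=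
  n ≤ 1 ∨ n * n - 1 ≤ (scores.length : Int)
instance (n : Int) (scores : List Int) : Decidable (Pre_read_score n scores) := by
  unfold Pre_read_score; infer_instance

def pvWitness_read_score : Int × List Int := (3, [0, 1, 2, 2, 0, 0, 1, 3, 0])

def Spec_read_score (n : Int) (scores : List Int) (out : List (Int × List Int)) : Prop :=
  out = read_score_alt n scores
instance (n : Int) (scores : List Int) (out : List (Int × List Int)) :
    Decidable (Spec_read_score n scores out) := by unfold Spec_read_score; infer_instance

-- ===== CLAIM (what is proved, stated in full; the proofs are below) =====
def Claim_equal_read_score : Prop := ∀ (n : Int) (scores : List Int),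
  Dom_read_score n scores → Pre_read_score n scores →
  Spec_read_score n scores (read_score n scores)

-- ===== LEMMAS AND PROOFS =====

-- goals of team i against team j (both programs read this position of the flat matrix)
def goalOf (n : Int) (scores : List Int) (i j : Int) : Int :=
  (PySem.List.pyGet? scores (i * n + j)).getD 0

-- points a team earns from one match, given own and opponent goals
def dP (a b : Int) : Int := if a = b then 1 else if a > b then 3 else 0

-- dict items viewed as (team, (points, goaldiff)) triples
def asItems (L : List (Int × Int × Int)) : List (Int × List Int) :=
  L.map fun r => (r.1, [r.2.1, r.2.2])

-- adding c to the points / goal-diff entry of team t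
def bump0 (t c : Int) (r : Int × Int × Int) : Int × Int × Int :=
  if r.1 = t then (t, (r.2.1 + c, r.2.2)) else r
def bump1 (t c : Int) (r : Int × Int × Int) : Int × Int × Int :=
  if r.1 = t then (t, (r.2.1, r.2.2 + c)) else r

-- the net effect of one match (i, j) on one standings row
def updPair (n : Int) (scores : List Int) (i j : Int) (r : Int × Int × Int) : Int × Int × Int :=
  if r.1 = i then
    (i, (r.2.1 + dP (goalOf n scores i j) (goalOf n scores j i),
         r.2.2 + (goalOf n scores i j - goalOf n scores j i)))
  else if r.1 = j then
    (j, (r.2.1 + dP (goalOf n scores j i) (goalOf n scores i j),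
         r.2.2 + (goalOf n scores j i - goalOf n scores i j)))
  else r

-- points / goal-diff of team t against a list of opponents
def oppP (n : Int) (scores : List Int) (t : Int) (l : List Int) : Int :=
  (l.map fun j => dP (goalOf n scores t j) (goalOf n scores j t)).sum
def oppG (n : Int) (scores : List Int) (t : Int) (l : List Int) : Int :=
  (l.map fun j => goalOf n scores t j - goalOf n scores j t).sum

-- opponents of team t accounted for after A has processed all pair-blocks with first index < m
def opps (n m t : Int) : List Int :=
  if t < m then PySem.List.pyRange 0 t 1 ++ PySem.List.pyRange (t + 1) n 1
  else PySem.List.pyRange 0 m 1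

def valP (n : Int) (scores : List Int) (m t : Int) : Int := oppP n scores t (opps n m t)
def valG (n : Int) (scores : List Int) (m t : Int) : Int := oppG n scores t (opps n m t)

-- the final standings table both programs produce
def standing (n : Int) (scores : List Int) : List (Int × List Int) :=
  (PySem.List.pyRange 0 n 1).map fun t => (t, [valP n scores n t, valG n scores n t])

-- one block of A's outer fold
def outerStep (n : Int) (scores : List Int) (d : PySem.Dict Int (List Int)) (i : Int) :
    PySem.Dict Int (List Int) :=
  ((PySem.List.pyRange (i + 1) n 1).map fun j => (i, j)).foldl (rsStep n scores) d

lemma outerStep_eq (n : Int) (scores : List Int) (d : PySem.Dict Int (List Int)) (i : Int) :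
    outerStep n scores d i
      = (PySem.List.pyRange (i + 1) n 1).foldl (fun d j => rsStep n scores d (i, j)) d := by
  unfold outerStep; rw [List.foldl_map]

lemma dP_self {a b : Int} (h : a = b) : dP a b = 1 := by simp [dP, h]

lemma dP_refl (a : Int) : dP a a = 1 := dP_self rfl

lemma dP_gt {a b : Int} (h : b < a) : dP a b = 3 := by
  unfold dP; rw [if_neg (by omega), if_pos (by omega)]

lemma dP_lt {a b : Int} (h : a < b) : dP a b = 0 := by
  unfold dP; rw [if_neg (by omega), if_neg (by omega)]

lemma oppP_cons (n : Int) (scores : List Int) (t j : Int) (l : List Int) :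
    oppP n scores t (j :: l)
      = dP (goalOf n scores t j) (goalOf n scores j t) + oppP n scores t l := by
  simp [oppP]

lemma oppG_cons (n : Int) (scores : List Int) (t j : Int) (l : List Int) :
    oppG n scores t (j :: l)
      = (goalOf n scores t j - goalOf n scores j t) + oppG n scores t l := by
  simp [oppG]

lemma oppP_append (n : Int) (scores : List Int) (t : Int) (l₁ l₂ : List Int) :
    oppP n scores t (l₁ ++ l₂) = oppP n scores t l₁ + oppP n scores t l₂ := by
  simp [oppP]

lemma oppG_append (n : Int) (scores : List Int) (t : Int) (l₁ l₂ : List Int) :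
    oppG n scores t (l₁ ++ l₂) = oppG n scores t l₁ + oppG n scores t l₂ := by
  simp [oppG]

lemma nodup_append_singleton {l : List Int} {x : Int} (h : l.Nodup) (hx : x ∉ l) :
    (l ++ [x]).Nodup := by
  rw [List.nodup_append]
  refine ⟨h, List.nodup_singleton _, ?_⟩
  intro y hy z hz
  rw [List.mem_singleton] at hz
  subst hz
  intro hcontra
  exact hx (hcontra ▸ hy)

lemma map_fst_asItems (L : List (Int × Int × Int)) :
    (asItems L).map Prod.fst = L.map Prod.fst := by
  simp [asItems, List.map_map]

lemma keys_of_items {d : PySem.Dict Int (List Int)} {L : List (Int × Int × Int)}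
    (hd : d.items = asItems L) : d.keys = L.map Prod.fst := by
  have h : d.keys = d.items.map Prod.fst := rfl
  rw [h, hd, map_fst_asItems]

lemma contains_of_items {d : PySem.Dict Int (List Int)} {L : List (Int × Int × Int)}
    (hd : d.items = asItems L) (t : Int) :
    d.contains t = decide (t ∈ L.map Prod.fst) := by
  rw [PySem.Dict.contains_eq_decide_mem_keys, keys_of_items hd]

lemma modify_items {f : List Int → List Int} {u : Int × Int → Int × Int}
    (hf : ∀ a b : Int, f [a, b] = [(u (a, b)).1, (u (a, b)).2])
    (d : PySem.Dict Int (List Int)) (L : List (Int × Int × Int)) (t : Int)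
    (hd : d.items = asItems L) (hnd : (L.map Prod.fst).Nodup)
    (ht : t ∈ L.map Prod.fst) :
    (d.modify t [] f).items
      = asItems (L.map fun r => if r.1 = t then (t, u r.2) else r) := by
  obtain ⟨r0, hr0, ht0⟩ := List.mem_map.mp ht
  have hcont : d.contains t = true := by
    rw [contains_of_items hd]
    simp only [decide_eq_true_eq, List.mem_map]
    exact ⟨r0, hr0, ht0⟩
  have hmem : (t, [r0.2.1, r0.2.2]) ∈ d.items := by
    rw [hd]
    exact List.mem_map.mpr ⟨r0, hr0, by rw [ht0]⟩
  have hndk : d.keys.Nodup := by rw [keys_of_items hd]; exact hnd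
  have hget : d.getD t [] = [r0.2.1, r0.2.2] :=
    PySem.Dict.getD_of_mem_items d hmem hndk []
  show (d.insert t (f (d.getD t []))).items = _
  rw [PySem.Dict.items_insert_of_contains _ _ hcont, hget, hf, hd]
  simp only [asItems, List.map_map]
  apply List.map_congr_left
  intro r hr
  by_cases h : r.1 = t
  · have hrr : r = r0 := List.inj_on_of_nodup_map hnd hr hr0 (by rw [h, ht0])
    simp [Function.comp, hrr, ht0]
  · simp [Function.comp, h]

lemma setdefault_mem {d : PySem.Dict Int (List Int)} {L : List (Int × Int × Int)}
    (hd : d.items = asItems L) (t : Int) (v : List Int) (ht : t ∈ L.map Prod.fst) :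
    d.setdefault t v = d := by
  apply PySem.Dict.setdefault_of_contains
  rw [contains_of_items hd]
  simpa using ht

lemma setdefault_fresh {d : PySem.Dict Int (List Int)} {L : List (Int × Int × Int)}
    (hd : d.items = asItems L) (t : Int) (ht : t ∉ L.map Prod.fst) :
    (d.setdefault t [0, 0]).items = asItems (L ++ [(t, ((0 : Int), (0 : Int)))]) := by
  have hcont : d.contains t = false := by
    rw [contains_of_items hd]
    simpa using ht
  rw [PySem.Dict.setdefault_of_not_contains _ _ hcont,
      PySem.Dict.items_insert_of_not_contains _ _ hcont, hd]
  simp [asItems]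

lemma bump0_fst (t c : Int) (r : Int × Int × Int) : (bump0 t c r).1 = r.1 := by
  unfold bump0
  by_cases h : r.1 = t
  · rw [if_pos h]; exact h.symm
  · rw [if_neg h]

lemma bump1_fst (t c : Int) (r : Int × Int × Int) : (bump1 t c r).1 = r.1 := by
  unfold bump1
  by_cases h : r.1 = t
  · rw [if_pos h]; exact h.symm
  · rw [if_neg h]

lemma updPair_fst (n : Int) (scores : List Int) (i j : Int) (r : Int × Int × Int) :
    (updPair n scores i j r).1 = r.1 := by
  unfold updPair
  by_cases h1 : r.1 = i
  · rw [if_pos h1]; exact h1.symm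
  · rw [if_neg h1]
    by_cases h2 : r.1 = j
    · rw [if_pos h2]; exact h2.symm
    · rw [if_neg h2]

lemma map_fst_bump0 (L : List (Int × Int × Int)) (t c : Int) :
    ((L.map (bump0 t c)).map Prod.fst) = L.map Prod.fst := by
  rw [List.map_map]
  exact List.map_congr_left fun r _ => bump0_fst t c r

lemma map_fst_bump1 (L : List (Int × Int × Int)) (t c : Int) :
    ((L.map (bump1 t c)).map Prod.fst) = L.map Prod.fst := by
  rw [List.map_map]
  exact List.map_congr_left fun r _ => bump1_fst t c r

lemma map_fst_map_updPair (n : Int) (scores : List Int) (i j : Int)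
    (L : List (Int × Int × Int)) :
    ((L.map (updPair n scores i j)).map Prod.fst) = L.map Prod.fst := by
  rw [List.map_map]
  exact List.map_congr_left fun r _ => updPair_fst n scores i j r

lemma modify_items0 (d : PySem.Dict Int (List Int)) (L : List (Int × Int × Int)) (t c : Int)
    (hd : d.items = asItems L) (hnd : (L.map Prod.fst).Nodup) (ht : t ∈ L.map Prod.fst) :
    (d.modify t [] (fun v => v.set 0 (v.getD 0 0 + c))).items
      = asItems (L.map (bump0 t c)) :=
  modify_items (u := fun ab => (ab.1 + c, ab.2)) (fun _ _ => rfl) d L t hd hnd ht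

lemma modify_items1 (d : PySem.Dict Int (List Int)) (L : List (Int × Int × Int)) (t c : Int)
    (hd : d.items = asItems L) (hnd : (L.map Prod.fst).Nodup) (ht : t ∈ L.map Prod.fst) :
    (d.modify t [] (fun v => v.set 1 (v.getD 1 0 + c))).items
      = asItems (L.map (bump1 t c)) :=
  modify_items (u := fun ab => (ab.1, ab.2 + c)) (fun _ _ => rfl) d L t hd hnd ht

lemma rsBranch_items (n : Int) (scores : List Int) (d : PySem.Dict Int (List Int))
    (M : List (Int × Int × Int)) (i j : Int)
    (hd : d.items = asItems M) (hnd : (M.map Prod.fst).Nodup)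
    (hi : i ∈ M.map Prod.fst) (hj : j ∈ M.map Prod.fst) (hij : i ≠ j) :
    (rsBranch n scores i j d).items = asItems (M.map (updPair n scores i j)) := by
  have e : i + j * n = j * n + i := by ring
  unfold rsBranch
  rw [e]
  rw [show (PySem.List.pyGet? scores (i * n + j)).getD 0 = goalOf n scores i j from rfl,
      show (PySem.List.pyGet? scores (j * n + i)).getD 0 = goalOf n scores j i from rfl]
  by_cases h1 : goalOf n scores i j = goalOf n scores j i
  · rw [if_pos h1]
    have s1 := modify_items0 d M i 1 hd hnd hi
    have s2 := modify_items0 _ (M.map (bump0 i 1)) j 1 s1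
      (by rw [map_fst_bump0]; exact hnd) (by rw [map_fst_bump0]; exact hj)
    rw [s2, List.map_map]
    apply congrArg asItems
    apply List.map_congr_left
    rintro ⟨rk, rp, rg⟩ _
    by_cases hri : rk = i
    · subst hri
      simp [Function.comp, bump0, updPair, hij, dP_refl, h1]
    · by_cases hrj : rk = j
      · subst hrj
        simp [Function.comp, bump0, updPair, hri, Ne.symm hij, dP_refl, h1]
      · simp [Function.comp, bump0, updPair, hri, hrj]
  · rw [if_neg h1]
    by_cases h2 : goalOf n scores i j > goalOf n scores j i
    · rw [if_pos h2]
      have s1 := modify_items0 d M i 3 hd hnd hi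
      have s2 := modify_items1 _ (M.map (bump0 i 3)) i
        (goalOf n scores i j - goalOf n scores j i) s1
        (by rw [map_fst_bump0]; exact hnd) (by rw [map_fst_bump0]; exact hi)
      have s3 := modify_items1 _ ((M.map (bump0 i 3)).map
          (bump1 i (goalOf n scores i j - goalOf n scores j i))) j
        (goalOf n scores j i - goalOf n scores i j) s2
        (by rw [map_fst_bump1, map_fst_bump0]; exact hnd)
        (by rw [map_fst_bump1, map_fst_bump0]; exact hj)
      rw [s3, List.map_map, List.map_map]
      apply congrArg asItems
      apply List.map_congr_left
      rintro ⟨rk, rp, rg⟩ _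
      by_cases hri : rk = i
      · subst hri
        simp [Function.comp, bump0, bump1, updPair, hij, dP_gt h2]
      · by_cases hrj : rk = j
        · subst hrj
          simp [Function.comp, bump0, bump1, updPair, hri, Ne.symm hij, dP_lt h2]
        · simp [Function.comp, bump0, bump1, updPair, hri, hrj]
    · rw [if_neg h2]
      have hlt : goalOf n scores i j < goalOf n scores j i := by omega
      have s1 := modify_items0 d M j 3 hd hnd hj
      have s2 := modify_items1 _ (M.map (bump0 j 3)) j
        (goalOf n scores j i - goalOf n scores i j) s1
        (by rw [map_fst_bump0]; exact hnd) (by rw [map_fst_bump0]; exact hj)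
      have s3 := modify_items1 _ ((M.map (bump0 j 3)).map
          (bump1 j (goalOf n scores j i - goalOf n scores i j))) i
        (goalOf n scores i j - goalOf n scores j i) s2
        (by rw [map_fst_bump1, map_fst_bump0]; exact hnd)
        (by rw [map_fst_bump1, map_fst_bump0]; exact hi)
      rw [s3, List.map_map, List.map_map]
      apply congrArg asItems
      apply List.map_congr_left
      rintro ⟨rk, rp, rg⟩ _
      by_cases hrj : rk = j
      · subst hrj
        simp [Function.comp, bump0, bump1, updPair, Ne.symm hij, dP_gt hlt]
      · by_cases hri : rk = i
        · subst hri
          simp [Function.comp, bump0, bump1, updPair, hij, hrj, dP_lt hlt]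
        · simp [Function.comp, bump0, bump1, updPair, hri, hrj]

lemma rsStep_present (n : Int) (scores : List Int) (d : PySem.Dict Int (List Int))
    (L : List (Int × Int × Int)) (i j : Int)
    (hd : d.items = asItems L) (hnd : (L.map Prod.fst).Nodup)
    (hi : i ∈ L.map Prod.fst) (hj : j ∈ L.map Prod.fst) (hij : i ≠ j) :
    (rsStep n scores d (i, j)).items = asItems (L.map (updPair n scores i j)) := by
  show (rsBranch n scores i j ((d.setdefault i [0, 0]).setdefault j [0, 0])).items = _
  rw [setdefault_mem hd i _ hi, setdefault_mem hd j _ hj]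
  exact rsBranch_items n scores d L i j hd hnd hi hj hij

lemma rsStep_fresh (n : Int) (scores : List Int) (d : PySem.Dict Int (List Int))
    (L : List (Int × Int × Int)) (i j : Int)
    (hd : d.items = asItems L) (hnd : (L.map Prod.fst).Nodup)
    (hi : i ∈ L.map Prod.fst) (hj : j ∉ L.map Prod.fst) :
    (rsStep n scores d (i, j)).items
      = asItems ((L ++ [(j, ((0 : Int), (0 : Int)))]).map (updPair n scores i j)) := by
  have hij : i ≠ j := fun h => hj (h ▸ hi)
  show (rsBranch n scores i j ((d.setdefault i [0, 0]).setdefault j [0, 0])).items = _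
  rw [setdefault_mem hd i _ hi]
  have h2 := setdefault_fresh hd j hj
  refine rsBranch_items n scores _ (L ++ [(j, ((0 : Int), (0 : Int)))]) i j h2 ?_ ?_ ?_ hij
  · have hmapeq : ((L ++ [(j, ((0 : Int), (0 : Int)))]).map Prod.fst)
        = L.map Prod.fst ++ [j] := by simp
    rw [hmapeq]
    exact nodup_append_singleton hnd hj
  · rw [List.map_append]; exact List.mem_append_left _ hi
  · rw [List.map_append]; simp

lemma rsStep_empty (n : Int) (scores : List Int) (i j : Int) (hij : i ≠ j) :
    (rsStep n scores PySem.Dict.empty (i, j)).items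
      = asItems [(i, (dP (goalOf n scores i j) (goalOf n scores j i),
                      goalOf n scores i j - goalOf n scores j i)),
                 (j, (dP (goalOf n scores j i) (goalOf n scores i j),
                      goalOf n scores j i - goalOf n scores i j))] := by
  have h0 : (PySem.Dict.empty : PySem.Dict Int (List Int)).items = asItems [] := rfl
  show (rsBranch n scores i j
    ((PySem.Dict.empty.setdefault i [0, 0]).setdefault j [0, 0])).items = _
  have h1 : ((PySem.Dict.empty : PySem.Dict Int (List Int)).setdefault i [0, 0]).items
      = asItems [(i, ((0 : Int), (0 : Int)))] := by
    simpa using setdefault_fresh h0 i (by simp)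
  have hsd : (((PySem.Dict.empty : PySem.Dict Int (List Int)).setdefault i [0, 0]).setdefault
        j [0, 0]).items
      = asItems [(i, ((0 : Int), (0 : Int))), (j, ((0 : Int), (0 : Int)))] := by
    simpa using setdefault_fresh h1 j (by simp [Ne.symm hij])
  rw [rsBranch_items n scores _ [(i, ((0 : Int), (0 : Int))), (j, ((0 : Int), (0 : Int)))] i j
    hsd (by simp [hij]) (by simp) (by simp) hij]
  apply congrArg asItems
  simp [updPair, Ne.symm hij]

lemma block_present (n : Int) (scores : List Int) (i : Int) (js : List Int) :
    ∀ (L : List (Int × Int × Int)) (d : PySem.Dict Int (List Int)),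
    d.items = asItems L → (L.map Prod.fst).Nodup → i ∈ L.map Prod.fst →
    (∀ j ∈ js, j ∈ L.map Prod.fst ∧ j ≠ i) → js.Nodup →
    (js.foldl (fun d j => rsStep n scores d (i, j)) d).items
      = asItems (L.map fun r =>
          if r.1 = i then (i, (r.2.1 + oppP n scores i js, r.2.2 + oppG n scores i js))
          else if r.1 ∈ js then
            (r.1, (r.2.1 + dP (goalOf n scores r.1 i) (goalOf n scores i r.1),
                   r.2.2 + (goalOf n scores r.1 i - goalOf n scores i r.1)))
          else r) := by
  induction js with
  | nil =>
    intro L d hd _ _ _ _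
    rw [List.foldl_nil, hd]
    apply congrArg asItems
    conv_lhs => rw [← List.map_id L]
    apply List.map_congr_left
    rintro ⟨rk, rp, rg⟩ _
    by_cases h : rk = i
    · subst h; simp [oppP, oppG]
    · simp [h]
  | cons j js ih =>
    intro L d hd hnd hi hjs hjnd
    rw [List.foldl_cons]
    have hj := hjs j (by simp)
    have hjnotin : j ∉ js := (List.nodup_cons.mp hjnd).1
    have hstep := rsStep_present n scores d L i j hd hnd hi hj.1 (fun h => hj.2 h.symm)
    have ih' := ih (L.map (updPair n scores i j)) (rsStep n scores d (i, j)) hstep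
      (by rw [map_fst_map_updPair]; exact hnd)
      (by rw [map_fst_map_updPair]; exact hi)
      (by intro j' hj'
          rw [map_fst_map_updPair]
          exact hjs j' (List.mem_cons_of_mem _ hj'))
      (List.Nodup.of_cons hjnd)
    rw [ih', List.map_map]
    apply congrArg asItems
    apply List.map_congr_left
    rintro ⟨rk, rp, rg⟩ _
    by_cases hri : rk = i
    · subst hri
      simp [Function.comp, updPair, oppP_cons, oppG_cons, add_assoc]
    · by_cases hrj : rk = j
      · subst hrj
        simp [Function.comp, updPair, hj.2, hri, hjnotin]
      · by_cases hin : rk ∈ js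
        · simp [Function.comp, updPair, hri, hrj, hin]
        · simp [Function.comp, updPair, hri, hrj, hin]

lemma block0 (n : Int) (scores : List Int) (js : List Int) :
    ∀ (p q : Int) (R : List (Int × Int × Int)) (d : PySem.Dict Int (List Int)),
    d.items = asItems ((0, (p, q)) :: R) →
    ((((0 : Int), (p, q)) :: R).map Prod.fst).Nodup →
    (0 : Int) ∉ js → js.Nodup →
    (∀ j ∈ js, j ∉ (((0 : Int), (p, q)) :: R).map Prod.fst) →
    (js.foldl (fun d j => rsStep n scores d (0, j)) d).items
      = asItems ((0, (p + oppP n scores 0 js, q + oppG n scores 0 js)) ::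
          (R ++ js.map fun j => (j, (dP (goalOf n scores j 0) (goalOf n scores 0 j),
                                     goalOf n scores j 0 - goalOf n scores 0 j)))) := by
  induction js with
  | nil =>
    intro p q R d hd _ _ _ _
    rw [List.foldl_nil, hd]
    simp [oppP, oppG]
  | cons j js ih =>
    intro p q R d hd hnd h0 hjnd hR
    rw [List.foldl_cons]
    have hjne : j ≠ 0 := fun h => h0 (h ▸ (by simp : j ∈ j :: js))
    have hjfresh : j ∉ (((0 : Int), (p, q)) :: R).map Prod.fst := hR j (by simp)
    have hRfst : ∀ r ∈ R, r.1 ≠ 0 := by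
      intro r hr h
      have hnd' : ((0 : Int) ∉ R.map Prod.fst) ∧ (R.map Prod.fst).Nodup := by
        simpa using hnd
      exact hnd'.1 (h ▸ List.mem_map.mpr ⟨r, hr, rfl⟩)
    have hRj : ∀ r ∈ R, r.1 ≠ j := by
      intro r hr h
      apply hjfresh
      simp only [List.map_cons]
      exact List.mem_cons_of_mem _ (h ▸ List.mem_map.mpr ⟨r, hr, rfl⟩)
    have hstep := rsStep_fresh n scores d ((0, (p, q)) :: R) 0 j hd hnd (by simp) hjfresh
    have hlist : ((((0 : Int), (p, q)) :: R) ++ [(j, ((0 : Int), (0 : Int)))]).map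
          (updPair n scores 0 j)
        = ((0 : Int), (p + dP (goalOf n scores 0 j) (goalOf n scores j 0),
              q + (goalOf n scores 0 j - goalOf n scores j 0))) ::
          (R ++ [(j, (dP (goalOf n scores j 0) (goalOf n scores 0 j),
              goalOf n scores j 0 - goalOf n scores 0 j))]) := by
      have hmapR : R.map (updPair n scores 0 j) = R :=
        (List.map_congr_left fun r hr => by
          unfold updPair
          rw [if_neg (hRfst r hr), if_neg (hRj r hr)]
          rfl).trans (List.map_id R)
      have h000 : updPair n scores 0 j ((0 : Int), (p, q))
          = ((0 : Int), (p + dP (goalOf n scores 0 j) (goalOf n scores j 0),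
              q + (goalOf n scores 0 j - goalOf n scores j 0))) := by
        simp [updPair]
      have hj00 : updPair n scores 0 j ((j : Int), ((0 : Int), (0 : Int)))
          = (j, (dP (goalOf n scores j 0) (goalOf n scores 0 j),
              goalOf n scores j 0 - goalOf n scores 0 j)) := by
        simp [updPair, hjne]
      simp only [List.cons_append, List.map_cons, List.map_append, List.map_nil]
      rw [h000, hj00, hmapR]
    rw [hlist] at hstep
    have hfsteq : ((((0 : Int), (p + dP (goalOf n scores 0 j) (goalOf n scores j 0),
            q + (goalOf n scores 0 j - goalOf n scores j 0))) ::
          (R ++ [(j, (dP (goalOf n scores j 0) (goalOf n scores 0 j),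
              goalOf n scores j 0 - goalOf n scores 0 j))])).map Prod.fst)
        = ((((0 : Int), (p, q)) :: R).map Prod.fst) ++ [j] := by simp
    have ih' := ih (p + dP (goalOf n scores 0 j) (goalOf n scores j 0))
      (q + (goalOf n scores 0 j - goalOf n scores j 0))
      (R ++ [(j, (dP (goalOf n scores j 0) (goalOf n scores 0 j),
          goalOf n scores j 0 - goalOf n scores 0 j))])
      (rsStep n scores d (0, j)) hstep
      (by rw [hfsteq]; exact nodup_append_singleton hnd hjfresh)
      (fun h => h0 (List.mem_cons_of_mem _ h))
      (List.Nodup.of_cons hjnd)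
      (by
        intro j' hj' hmem
        rw [hfsteq] at hmem
        rcases List.mem_append.mp hmem with h | h
        · exact hR j' (List.mem_cons_of_mem _ hj') h
        · rw [List.mem_singleton] at h
          exact (List.nodup_cons.mp hjnd).1 (h ▸ hj'))
    rw [ih']
    apply congrArg asItems
    rw [oppP_cons, oppG_cons, List.map_cons]
    congr 1
    · simp [add_assoc]
    · rw [List.append_assoc]
      rfl

lemma blocks (n : Int) (scores : List Int) (k : Nat) :
    ∀ (m : Int) (d : PySem.Dict Int (List Int)), 1 ≤ m → m ≤ n → (n - m).toNat = k →
    d.items = asItems ((PySem.List.pyRange 0 n 1).map fun t =>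
      (t, (valP n scores m t, valG n scores m t))) →
    ((PySem.List.pyRange m n 1).foldl (outerStep n scores) d).items
      = asItems ((PySem.List.pyRange 0 n 1).map fun t =>
          (t, (valP n scores n t, valG n scores n t))) := by
  induction k with
  | zero =>
    intro m d h1 h2 hk hd
    have hmn : m = n := by omega
    rw [PySem.List.pyRange_one_eq_nil (by omega), List.foldl_nil, hd, hmn]
  | succ k ih =>
    intro m d h1 h2 hk hd
    have hmn : m < n := by omega
    rw [PySem.List.pyRange_one_cons hmn, List.foldl_cons]
    have hfst : ((PySem.List.pyRange 0 n 1).map fun t =>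
        ((t : Int), (valP n scores m t, valG n scores m t))).map Prod.fst
        = PySem.List.pyRange 0 n 1 := by
      rw [List.map_map]
      exact (List.map_congr_left fun t _ => rfl).trans (List.map_id _)
    have hb : (outerStep n scores d m).items
        = asItems ((PySem.List.pyRange 0 n 1).map fun t =>
            (t, (valP n scores (m + 1) t, valG n scores (m + 1) t))) := by
      rw [outerStep_eq]
      refine Eq.trans (block_present n scores m (PySem.List.pyRange (m + 1) n 1) _ d hd
        (by rw [hfst]; exact PySem.List.nodup_pyRange_one 0 n)
        (by rw [hfst]; exact (PySem.List.mem_pyRange_one).mpr ⟨by omega, hmn⟩)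
        (by intro j hj
            have := (PySem.List.mem_pyRange_one).mp hj
            refine ⟨?_, by omega⟩
            rw [hfst]; exact (PySem.List.mem_pyRange_one).mpr ⟨by omega, by omega⟩)
        (PySem.List.nodup_pyRange_one (m + 1) n)) ?_
      apply congrArg asItems
      rw [List.map_map]
      apply List.map_congr_left
      intro t ht
      have htr := (PySem.List.mem_pyRange_one).mp ht
      rcases lt_trichotomy t m with hlt | heq | hgt
      · have hne : t ≠ m := by omega
        have hnotin : t ∉ PySem.List.pyRange (m + 1) n 1 := by
          rw [PySem.List.mem_pyRange_one]; omega
        simp only [Function.comp]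
        simp [hne, hnotin]
        unfold valP valG opps
        rw [if_pos hlt, if_pos (by omega)]
        exact ⟨rfl, rfl⟩
      · subst heq
        have hnotin : t ∉ PySem.List.pyRange (t + 1) n 1 := by
          rw [PySem.List.mem_pyRange_one]; omega
        simp only [Function.comp]
        simp
        unfold valP valG opps
        rw [if_neg (by omega), if_pos (by omega), oppP_append, oppG_append]
        exact ⟨rfl, rfl⟩
      · have hne : t ≠ m := by omega
        have hmem : t ∈ PySem.List.pyRange (m + 1) n 1 := by
          rw [PySem.List.mem_pyRange_one]; omega
        simp only [Function.comp]
        simp [hne, hmem]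
        unfold valP valG opps
        rw [if_neg (by omega), if_neg (by omega),
            PySem.List.pyRange_one_succ_right (by omega : (0 : Int) ≤ m),
            oppP_append, oppG_append]
        simp [oppP, oppG]
    exact ih (m + 1) (outerStep n scores d m) (by omega) (by omega) (by omega) hb

lemma foldl_flatMap {α β γ : Type} (l : List α) (f : α → List β) (g : γ → β → γ) (init : γ) :
    (l.flatMap f).foldl g init = l.foldl (fun a x => (f x).foldl g a) init := by
  induction l generalizing init with
  | nil => rfl
  | cons x l ih => simp [List.foldl_append, ih]

lemma plays_eq (n : Int) :
    plays n = (PySem.List.pyRange 0 n 1).flatMap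
      (fun i => (PySem.List.pyRange (i + 1) n 1).map fun j => (i, j)) := by
  unfold plays
  simp only [PySem.List.foldl_append_singleton_eq_map]
  rw [PySem.List.foldl_append_eq_flatMap
    (g := fun (fe : Int × Int) => (PySem.List.pyRange (fe.1 + 1) n 1).map fun s => (fe.1, s))]
  rw [List.nil_append, PySem.List.enumerate_eq_map_pyRange (PySem.List.pyRange 0 n 1) 0,
      List.flatMap_map]
  by_cases hn : 0 ≤ n
  · rw [show PySem.List.len (PySem.List.pyRange 0 n 1) = n from by
      unfold PySem.List.len; rw [PySem.List.length_pyRange_one]; omega]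
  · rw [show PySem.List.len (PySem.List.pyRange 0 n 1) = 0 from by
      unfold PySem.List.len; rw [PySem.List.length_pyRange_one]; omega]
    rw [PySem.List.pyRange_one_eq_nil (le_refl (0 : Int)),
        PySem.List.pyRange_one_eq_nil (by omega : n ≤ (0 : Int))]

lemma A_small (n : Int) (scores : List Int) (h : n < 2) : read_score n scores = [] := by
  unfold read_score
  rw [plays_eq]
  have hnil : (PySem.List.pyRange 0 n 1).flatMap
      (fun i => (PySem.List.pyRange (i + 1) n 1).map fun j => (i, j)) = [] := by
    rw [List.flatMap_eq_nil_iff]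
    intro i hi
    have := (PySem.List.mem_pyRange_one).mp hi
    rw [PySem.List.pyRange_one_eq_nil (by omega)]
    rfl
  rw [hnil]
  rfl

lemma A_main (n : Int) (scores : List Int) (h2 : 2 ≤ n) :
    read_score n scores = standing n scores := by
  have h0n : (0 : Int) < n := by omega
  have h1n : (1 : Int) < n := by omega
  have hsplit0 : PySem.List.pyRange 0 n 1 = 0 :: PySem.List.pyRange 1 n 1 := by
    rw [PySem.List.pyRange_one_cons h0n]; norm_num
  have hsplit1 : PySem.List.pyRange 1 n 1 = 1 :: PySem.List.pyRange 2 n 1 := by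
    rw [PySem.List.pyRange_one_cons h1n]; norm_num
  have hb0 : (outerStep n scores PySem.Dict.empty 0).items
      = asItems ((PySem.List.pyRange 0 n 1).map fun t =>
          (t, (valP n scores 1 t, valG n scores 1 t))) := by
    rw [outerStep_eq, show (0 : Int) + 1 = 1 from rfl, hsplit1, List.foldl_cons]
    have hd1 := rsStep_empty n scores 0 1 (by omega)
    refine Eq.trans (block0 n scores (PySem.List.pyRange 2 n 1) _ _ _ _ hd1
      (by simp)
      (by intro h; have := (PySem.List.mem_pyRange_one).mp h; omega)
      (PySem.List.nodup_pyRange_one 2 n)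
      (by intro j hj hmem
          have := (PySem.List.mem_pyRange_one).mp hj
          simp at hmem
          omega)) ?_
    apply congrArg asItems
    rw [show ([((1 : Int), (dP (goalOf n scores 1 0) (goalOf n scores 0 1),
          goalOf n scores 1 0 - goalOf n scores 0 1))] ++
        (PySem.List.pyRange 2 n 1).map fun j =>
          ((j : Int), (dP (goalOf n scores j 0) (goalOf n scores 0 j),
            goalOf n scores j 0 - goalOf n scores 0 j)))
      = ((1 : Int) :: PySem.List.pyRange 2 n 1).map (fun j =>
          ((j : Int), (dP (goalOf n scores j 0) (goalOf n scores 0 j),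
            goalOf n scores j 0 - goalOf n scores 0 j))) from by rw [List.map_cons]; simp]
    rw [← hsplit1]
    conv_rhs => rw [hsplit0]
    rw [List.map_cons]
    congr 1
    · unfold valP valG opps
      rw [if_pos (by omega : (0 : Int) < 1),
          PySem.List.pyRange_one_eq_nil (le_refl (0 : Int)), List.nil_append,
          show (0 : Int) + 1 = 1 from by norm_num, hsplit1, oppP_cons, oppG_cons]
    · apply List.map_congr_left
      intro t ht
      have htb := (PySem.List.mem_pyRange_one).mp ht
      unfold valP valG opps
      rw [if_neg (by omega)]
      rw [show PySem.List.pyRange 0 1 1 = [(0 : Int)] from by decide]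
      simp [oppP, oppG]
  unfold read_score
  rw [plays_eq, foldl_flatMap]
  have key : ((PySem.List.pyRange 0 n 1).foldl (outerStep n scores) PySem.Dict.empty).items
      = asItems ((PySem.List.pyRange 0 n 1).map fun t =>
          (t, (valP n scores n t, valG n scores n t))) :=
    calc ((PySem.List.pyRange 0 n 1).foldl (outerStep n scores) PySem.Dict.empty).items
        = ((PySem.List.pyRange 1 n 1).foldl (outerStep n scores)
            (outerStep n scores PySem.Dict.empty 0)).items := by
          rw [hsplit0, List.foldl_cons]
      _ = asItems ((PySem.List.pyRange 0 n 1).map fun t =>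
            (t, (valP n scores n t, valG n scores n t))) :=
          blocks n scores (n - 1).toNat 1 (outerStep n scores PySem.Dict.empty 0)
            (by omega) (by omega) (by omega) hb0
  refine Eq.trans key ?_
  unfold standing asItems
  rw [List.map_map]
  rfl

lemma altFold (n : Int) (scores : List Int) (i : Int) (l : List Int)
    (hl : ∀ j ∈ l, j ≠ i) :
    ∀ (a b : Int),
    l.foldl
      (fun pg j =>
        if j == i then pg
        else (pg.1 + (if (PySem.List.pyGet? scores (i * n + j)).getD 0 >
                         (PySem.List.pyGet? scores (j * n + i)).getD 0 then 3
                      else if (PySem.List.pyGet? scores (i * n + j)).getD 0 =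
                              (PySem.List.pyGet? scores (j * n + i)).getD 0 then 1 else 0),
              pg.2 + ((PySem.List.pyGet? scores (i * n + j)).getD 0 -
                      (PySem.List.pyGet? scores (j * n + i)).getD 0)))
      (a, b) = (a + oppP n scores i l, b + oppG n scores i l) := by
  induction l with
  | nil => intro a b; simp [oppP, oppG]
  | cons j l ih =>
    intro a b
    have hbf : (if (PySem.List.pyGet? scores (i * n + j)).getD 0 >
           (PySem.List.pyGet? scores (j * n + i)).getD 0 then (3 : Int)
         else if (PySem.List.pyGet? scores (i * n + j)).getD 0 =
                 (PySem.List.pyGet? scores (j * n + i)).getD 0 then 1 else 0)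
        = dP (goalOf n scores i j) (goalOf n scores j i) := by
      show (if goalOf n scores i j > goalOf n scores j i then (3 : Int)
        else if goalOf n scores i j = goalOf n scores j i then 1 else 0) = _
      unfold dP
      split_ifs <;> omega
    have hji : (j == i) = false := by
      simp only [beq_eq_false_iff_ne, ne_eq]
      exact hl j (by simp)
    rw [List.foldl_cons]
    simp only [hji, Bool.false_eq_true, if_false]
    rw [ih (fun x hx => hl x (List.mem_cons_of_mem _ hx)), oppP_cons, oppG_cons, hbf]
    show ((a + _) + _, (b + _) + _) = _
    simp [add_assoc, goalOf]

lemma altInner_eq (n : Int) (scores : List Int) (i : Int) (h0 : 0 ≤ i) (hin : i < n) :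
    altInner n scores i = (valP n scores n i, valG n scores n i) := by
  unfold altInner
  rw [PySem.List.pyRange_one_append 0 i n h0 (le_of_lt hin),
      PySem.List.pyRange_one_cons hin, List.foldl_append, List.foldl_cons]
  rw [altFold n scores i (PySem.List.pyRange 0 i 1)
    (by intro j hj; have := (PySem.List.mem_pyRange_one).mp hj; omega) 0 0]
  simp only [beq_self_eq_true, if_true]
  rw [altFold n scores i (PySem.List.pyRange (i + 1) n 1)
    (by intro j hj; have := (PySem.List.mem_pyRange_one).mp hj; omega)]
  unfold valP valG opps
  rw [if_pos hin, oppP_append, oppG_append]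
  simp [add_assoc]

lemma foldl_insert_fresh' (v : Int → List Int) (l : List Int) :
    ∀ (d : PySem.Dict Int (List Int)), (∀ a ∈ l, d.contains a = false) → l.Nodup →
    (l.foldl (fun d a => d.insert a (v a)) d).items = d.items ++ l.map fun a => (a, v a) := by
  induction l with
  | nil => intro d _ _; simp
  | cons a l ih =>
    intro d hf hnd
    rw [List.foldl_cons]
    have hca := hf a (by simp)
    have hins : (d.insert a (v a)).items = d.items ++ [(a, v a)] :=
      PySem.Dict.items_insert_of_not_contains _ _ hca
    rw [ih (d.insert a (v a))
      (by intro x hx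
          rw [PySem.Dict.contains_insert]
          have hxa : x ≠ a := fun h => (List.nodup_cons.mp hnd).1 (h ▸ hx)
          simp [hxa, hf x (List.mem_cons_of_mem _ hx)])
      (List.Nodup.of_cons hnd)]
    rw [hins, List.append_assoc]
    rfl

lemma B_main (n : Int) (scores : List Int) (h2 : 2 ≤ n) :
    read_score_alt n scores = standing n scores := by
  unfold read_score_alt
  rw [if_pos (by omega : n ≥ 2)]
  refine Eq.trans (foldl_insert_fresh'
    (fun i => [(altInner n scores i).1, (altInner n scores i).2])
    (PySem.List.pyRange 0 n 1) PySem.Dict.empty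
    (fun a _ => by simp) (PySem.List.nodup_pyRange_one 0 n)) ?_
  rw [show (PySem.Dict.empty : PySem.Dict Int (List Int)).items = [] from rfl, List.nil_append]
  unfold standing
  apply List.map_congr_left
  intro i hi
  have hb := (PySem.List.mem_pyRange_one).mp hi
  show (i, [(altInner n scores i).1, (altInner n scores i).2]) = _
  rw [altInner_eq n scores i (by omega) (by omega)]

lemma B_small (n : Int) (scores : List Int) (h : n < 2) : read_score_alt n scores = [] := by
  unfold read_score_alt
  rw [if_neg (by omega)]

-- ===== VERDICT (by name: the statement is the Claim_ definition above) =====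
theorem read_score_spec : Claim_equal_read_score := by
  intro n scores _hdom _hpre
  unfold Spec_read_score
  by_cases h2 : 2 ≤ n
  · rw [A_main n scores h2, B_main n scores h2]
  · rw [A_small n scores (by omega), B_small n scores (by omega)]
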